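-- pv_equiv track=rewrite | github.com/kazuma-naka/CSSD-1102-Group-Project | starter_code.py | get_non_CH_atoms_from_smiles
-- ===== SOURCE A (Python) =====
-- def get_non_CH_atoms_from_smiles(smiles: str) -> list[str]:
--     """
--     Extract unique element symbols except C and H from a SMILES string.
--
--     Returns a sorted list of element symbols (e.g., ["N", "O", "Cl"]).
--     """
--     atoms = set()
--     i = 0
--
--     while i < len(smiles):
--         ch = smiles[i]
--
--         if ch.isalpha():
--             if i + 1 < len(smiles) and smiles[i + 1].islower():
--                 symbol = smiles[i:i+2]
--                 i += 2
--             else: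
--                 symbol = ch
--                 i += 1
--
--             if symbol not in ("C", "H"):
--                 atoms.add(symbol)
--         else:
--             i += 1
--
--     return sorted(atoms)
-- ===== SOURCE B (Python) =====
-- def get_non_CH_atoms_from_smiles(smiles: str) -> list[str]:
--     """
--     Extract unique element symbols except C and H from a SMILES string.
--
--     Single forward pass that remembers the PREVIOUS alphabetic character
--     (instead of peeking ahead): a lowercase letter extends the pending
--     letter into a two-char symbol, otherwise the pending letter is flushed
--     as a one-char symbol; then one set comprehension filters C/H and sorts.
--     """
--     tokens = []
--     pending = None
--     for ch in smiles:
--         if pending is not None and ch.islower():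
--             tokens.append(pending + ch)
--             pending = None
--         else:
--             if pending is not None:
--                 tokens.append(pending)
--             pending = ch if ch.isalpha() else None
--     if pending is not None:
--         tokens.append(pending)
--     return sorted({t for t in tokens if t not in ("C", "H")})
-- ===== Notes on version B (the rewrite author's own statement) =====
-- stated objective: alternative
-- what changed: Replaced the index-based while loop that peeks one character ahead (advancing i by 1 or 2) with a single forward fold that remembers the previous pending letter and flushes complete tokens, followed by one filtering set comprehension and sort.
import Mathlib
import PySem

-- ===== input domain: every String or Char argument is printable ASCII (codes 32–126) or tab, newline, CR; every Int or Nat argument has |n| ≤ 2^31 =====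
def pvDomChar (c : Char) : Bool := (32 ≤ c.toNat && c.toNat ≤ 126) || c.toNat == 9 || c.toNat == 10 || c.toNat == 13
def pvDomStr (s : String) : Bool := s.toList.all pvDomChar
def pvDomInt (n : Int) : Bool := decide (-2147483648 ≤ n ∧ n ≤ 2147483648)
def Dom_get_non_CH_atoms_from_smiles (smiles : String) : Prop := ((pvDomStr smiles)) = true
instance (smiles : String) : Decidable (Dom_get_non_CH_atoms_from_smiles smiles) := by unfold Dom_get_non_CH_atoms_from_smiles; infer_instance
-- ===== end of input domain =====

-- B replaces A's index loop with one-character lookahead by a single forward fold that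
-- remembers the previous pending letter, then one set comprehension; objective: simpler.


-- ===== PORT A =====
-- 'if symbol not in ("C", "H"): atoms.add(symbol)'
def pvAddA (atoms : PySem.Set String) (symbol : String) : PySem.Set String :=
  if !(symbol == "C" || symbol == "H") then PySem.Set.add atoms symbol else atoms

-- the while loop over the index, advancing by 2 when the next char is lowercase,
-- rendered as recursion consuming one or two characters of the remaining list
-- (the two-element pattern is the 'i + 1 < len(smiles)' test)
def pvLoopA : List Char → PySem.Set String → PySem.Set String
  | [], atoms => atoms
  | [c], atoms => if PySem.Chars.isalpha c then pvAddA atoms (String.ofList [c]) else atoms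
  | c :: c2 :: rest, atoms =>
    if PySem.Chars.isalpha c then
      if PySem.Chars.islower c2 then
        pvLoopA rest (pvAddA atoms (String.ofList [c, c2]))
      else
        pvLoopA (c2 :: rest) (pvAddA atoms (String.ofList [c]))
    else pvLoopA (c2 :: rest) atoms

def get_non_CH_atoms_from_smiles (smiles : String) : List String :=
  PySem.List.sorted (pvLoopA smiles.toList PySem.Set.empty) (fun x => x) false

-- ===== PORT B =====
-- one step of Source B's for-loop: state = (tokens, pending)
def pvStepB (st : List String × Option Char) (ch : Char) : List String × Option Char :=
  match st.2 with
  | some p =>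
    if PySem.Chars.islower ch then (st.1 ++ [String.ofList [p, ch]], none)
    else (st.1 ++ [String.ofList [p]], if PySem.Chars.isalpha ch then some ch else none)
  | none => (st.1, if PySem.Chars.isalpha ch then some ch else none)

-- the final 'if pending is not None: tokens.append(pending)'
def pvFlushB (st : List String × Option Char) : List String :=
  match st.2 with
  | some p => st.1 ++ [String.ofList [p]]
  | none => st.1

def get_non_CH_atoms_from_smiles_alt (smiles : String) : List String :=
  let toks := pvFlushB (smiles.toList.foldl pvStepB ([], none))
  PySem.List.sorted
    (PySem.Set.ofList (toks.filter (fun t => !(t == "C" || t == "H"))))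
    (fun x => x) false

-- ===== PRECONDITION & SPEC =====
def Spec_get_non_CH_atoms_from_smiles (smiles : String) (out : List String) : Prop := out = get_non_CH_atoms_from_smiles_alt smiles
instance (smiles : String) (out : List String) : Decidable (Spec_get_non_CH_atoms_from_smiles smiles out) := by unfold Spec_get_non_CH_atoms_from_smiles; infer_instance

-- ===== CLAIM (what is proved, stated in full; the proofs are below) =====
def Claim_equal_get_non_CH_atoms_from_smiles : Prop := ∀ (smiles : String), Dom_get_non_CH_atoms_from_smiles smiles → Spec_get_non_CH_atoms_from_smiles smiles (get_non_CH_atoms_from_smiles smiles)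

-- ===== LEMMAS AND PROOFS =====

-- the token list both programs implicitly produce (proof-side helper)
def pvTokA : List Char → List String
  | [] => []
  | [c] => if PySem.Chars.isalpha c then [String.ofList [c]] else []
  | c :: c2 :: rest =>
    if PySem.Chars.isalpha c then
      if PySem.Chars.islower c2 then String.ofList [c, c2] :: pvTokA rest
      else String.ofList [c] :: pvTokA (c2 :: rest)
    else pvTokA (c2 :: rest)


theorem pvAddA_foldl (atoms : PySem.Set String) (s : String) (l : List String) :
    List.foldl PySem.Set.add atoms (List.filter (fun t => !t == "C" && !t == "H") (s :: l))
      = List.foldl PySem.Set.add (pvAddA atoms s) (List.filter (fun t => !t == "C" && !t == "H") l) := by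
  simp only [List.filter_cons, pvAddA]
  by_cases h1 : s = "C" <;> by_cases h2 : s = "H" <;> simp [h1, h2]

theorem pvLoopA_eq_foldl (l : List Char) (atoms : PySem.Set String) :
    pvLoopA l atoms
      = ((pvTokA l).filter (fun t => !(t == "C" || t == "H"))).foldl PySem.Set.add atoms := by
  fun_induction pvLoopA l atoms with
  | case1 atoms => simp [pvTokA]
  | case2 c atoms ha =>
      rw [show pvTokA [c] = [String.ofList [c]] by simp [pvTokA, ha]]
      simp only [Bool.not_or, pvAddA_foldl, List.filter_nil, List.foldl_nil]
  | case3 c atoms ha =>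
      simp [pvTokA, ha]
  | case4 c c2 rest atoms ha hl ih =>
      rw [show pvTokA (c :: c2 :: rest) = String.ofList [c, c2] :: pvTokA rest by
        simp [pvTokA, ha, hl]]
      simp only [Bool.not_or] at ih ⊢
      rw [pvAddA_foldl]
      exact ih
  | case5 c c2 rest atoms ha hl ih =>
      rw [show pvTokA (c :: c2 :: rest) = String.ofList [c] :: pvTokA (c2 :: rest) by
        simp [pvTokA, ha, hl]]
      simp only [Bool.not_or] at ih ⊢
      rw [pvAddA_foldl]
      exact ih
  | case6 c c2 rest atoms ha ih =>
      rw [show pvTokA (c :: c2 :: rest) = pvTokA (c2 :: rest) by simp [pvTokA, ha]]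
      exact ih

theorem pvScanB_eq_tokA (l : List Char) (ts : List String) (p : Option Char)
    (hp : ∀ c, p = some c → PySem.Chars.isalpha c = true) :
    pvFlushB (l.foldl pvStepB (ts, p)) = ts ++ pvTokA (p.toList ++ l) := by
  induction l generalizing ts p with
  | nil =>
      cases p with
      | none => simp [pvFlushB, pvTokA]
      | some c => simp [pvFlushB, pvTokA, hp c rfl]
  | cons ch rest ih =>
      cases p with
      | none =>
          rw [List.foldl_cons]
          by_cases hA : PySem.Chars.isalpha ch = true
          · rw [show pvStepB (ts, none) ch = (ts, some ch) by simp [pvStepB, hA]]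
            rw [ih ts (some ch) (by intro c hc; cases hc; exact hA)]
            simp
          · rw [show pvStepB (ts, none) ch = (ts, none) by simp [pvStepB, hA]]
            rw [ih ts none (by intro c hc; cases hc)]
            cases rest <;> simp [pvTokA, hA]
      | some c =>
          have hc := hp c rfl
          rw [List.foldl_cons]
          by_cases hL : PySem.Chars.islower ch = true
          · rw [show pvStepB (ts, some c) ch = (ts ++ [String.ofList [c, ch]], none) by
              simp [pvStepB, hL]]
            rw [ih _ none (by intro d hd; cases hd)]
            simp [pvTokA, hc, hL]
          · by_cases hA : PySem.Chars.isalpha ch = true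
            · rw [show pvStepB (ts, some c) ch = (ts ++ [String.ofList [c]], some ch) by
                simp [pvStepB, hL, hA]]
              rw [ih _ (some ch) (by intro d hd; cases hd; exact hA)]
              simp [pvTokA, hc, hL]
            · rw [show pvStepB (ts, some c) ch = (ts ++ [String.ofList [c]], none) by
                simp [pvStepB, hL, hA]]
              rw [ih _ none (by intro d hd; cases hd)]
              cases rest <;> simp [pvTokA, hc, hL, hA]

-- ===== VERDICT (by name: the statement is the Claim_ definition above) =====
theorem get_non_CH_atoms_from_smiles_spec : Claim_equal_get_non_CH_atoms_from_smiles := by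
  intro smiles _
  unfold Spec_get_non_CH_atoms_from_smiles
  unfold get_non_CH_atoms_from_smiles get_non_CH_atoms_from_smiles_alt
  rw [pvLoopA_eq_foldl, pvScanB_eq_tokA _ _ none (by intro c hc; cases hc)]
  simp [PySem.Set.ofList_eq_foldl, PySem.Set.empty]
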